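-- pv_equiv track=rewrite | github.com/taeyoonnoh/Coding_Tips | [노태윤]/기본 알고리즘/약수.py | yaksu
-- ===== SOURCE A (Python) =====
-- def yaksu(N) :
--     yaksu_list = [False] * (N+1)
--     for i in range(1,N+1) :
--
--         # 이미 약수라고 정의 되었다면 그냥 continue
--         if yaksu_list[i] == True :
--             continue
--
--         a = N//i
--         b = N%i
--
--         # 만약 나누어 떨어진다면 아래 코드 실행
--         if b == 0 :
--             yaksu_list[i] = True
--             yaksu_list[a] = True
--
--     # 약수이면 True / 아니면 False 가 담긴 리스트 반환
--     return list(enumerate(yaksu_list))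
-- ===== SOURCE B (Python) =====
-- def yaksu(N):
--     # O(sqrt(N)): every divisor pair (i, N//i) has min(i, N//i) <= sqrt(N)
--     flags = [False] * (N + 1)
--     i = 1
--     while i * i <= N:
--         if N % i == 0:
--             flags[i] = True
--             flags[N // i] = True
--         i += 1
--     return list(enumerate(flags))
-- ===== Notes on version B (the rewrite author's own statement) =====
-- stated objective: alternative
-- what changed: Instead of scanning all candidates 1..N, B iterates i only up to sqrt(N) and marks both members i and N//i of each divisor pair; building the O(N) output list still dominates, so overall cost is similar.
import Mathlib
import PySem

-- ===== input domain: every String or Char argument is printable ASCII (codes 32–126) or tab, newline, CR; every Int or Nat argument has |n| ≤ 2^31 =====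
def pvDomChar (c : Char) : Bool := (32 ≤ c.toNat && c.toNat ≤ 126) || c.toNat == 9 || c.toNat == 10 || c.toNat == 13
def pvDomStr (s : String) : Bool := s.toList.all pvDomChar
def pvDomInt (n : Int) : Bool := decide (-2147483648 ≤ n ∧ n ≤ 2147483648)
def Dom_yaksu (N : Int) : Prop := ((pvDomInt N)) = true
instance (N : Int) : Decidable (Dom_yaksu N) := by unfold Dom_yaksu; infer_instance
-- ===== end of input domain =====

-- ===== PORT A =====
-- B marks each divisor pair (i, N//i) while iterating i only up to sqrt(N) instead of scanning 1..N;
-- the O(N) output list still dominates, so overall cost is similar (an alternative algorithm, not a confirmed speed-up).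
-- Body of A's 'for i in range(1, N+1)' loop; the loop itself is a foldl over pyRange.
-- yaksu_list[i] read: i is 1..N, always in range, so '(pyGet? …).getD false' is exact here.
def yaksuStepA (N : Int) (l : List Bool) (i : Int) : List Bool :=
  if (PySem.List.pyGet? l i).getD false = true then l
  else
    let a := PySem.Int.floordiv N i
    let b := PySem.Int.mod N i
    if b = 0 then PySem.List.pySetD (PySem.List.pySetD l i true) a true
    else l

def yaksu (N : Int) : List (Int × Bool) :=
  PySem.List.enumerate
    ((PySem.List.pyRange 1 (N + 1) 1).foldl (yaksuStepA N) (List.replicate (N + 1).toNat false)) 0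

-- ===== PORT B =====
-- B's 'while i * i <= N' loop as structural recursion; the Nat argument is fuel that only
-- makes the recursion structural ((N+1).toNat iterations always suffice, since the loop stops once i > N).
def yaksuLoopB (N : Int) : Nat → Int → List Bool → List Bool
  | 0, _, l => l
  | fuel + 1, i, l =>
    if i * i ≤ N then
      yaksuLoopB N fuel (i + 1)
        (if PySem.Int.mod N i = 0 then
          PySem.List.pySetD (PySem.List.pySetD l i true) (PySem.Int.floordiv N i) true
        else l)
    else l

def yaksu_alt (N : Int) : List (Int × Bool) :=
  PySem.List.enumerate (yaksuLoopB N (N + 1).toNat 1 (List.replicate (N + 1).toNat false)) 0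

-- ===== PRECONDITION & SPEC =====
def Spec_yaksu (N : Int) (out : List (Int × Bool)) : Prop := out = yaksu_alt N
instance (N : Int) (out : List (Int × Bool)) : Decidable (Spec_yaksu N out) := by unfold Spec_yaksu; infer_instance

-- ===== CLAIM (what is proved, stated in full; the proofs are below) =====
def Claim_equal_yaksu : Prop := ∀ (N : Int), Dom_yaksu N → Spec_yaksu N (yaksu N)

-- ===== LEMMAS AND PROOFS =====

-- After having processed candidates 1..k-1, index j is marked iff j is a divisor
-- (1 ≤ j, j ∣ N) whose pair has already been reached: j < k or N/j < k.
def CondY (N k : Int) (j : Nat) : Prop :=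
  1 ≤ (j : Int) ∧ N % (j : Int) = 0 ∧ ((j : Int) < k ∨ N / (j : Int) < k)

def InvY (N k : Int) (l : List Bool) : Prop :=
  l.length = (N + 1).toNat ∧ ∀ (j : Nat) (h : j < l.length), (l[j] = true ↔ CondY N k j)

def FinalY (N : Int) (l : List Bool) : Prop :=
  l.length = (N + 1).toNat ∧ ∀ (j : Nat) (h : j < l.length), (l[j] = true ↔ (1 ≤ (j : Int) ∧ N % (j : Int) = 0))

lemma quot_facts {N j : Int} (hN : 1 ≤ N) (hj : 1 ≤ j) (hd : N % j = 0) :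
    1 ≤ N / j ∧ N / j ≤ N ∧ N / (N / j) = j ∧ N % (N / j) = 0 := by
  obtain ⟨q, hq⟩ := (PySem.Int.emod_eq_zero_iff_dvd N j).1 hd
  have hj0 : j ≠ 0 := by omega
  have hNj : N / j = q := by rw [hq, Int.mul_ediv_cancel_left q hj0]
  have hq1 : 1 ≤ q := by nlinarith
  have hq0 : q ≠ 0 := by omega
  refine ⟨by omega, by nlinarith, ?_, ?_⟩
  · rw [hNj, hq, Int.mul_ediv_cancel j hq0]
  · rw [hNj, (PySem.Int.emod_eq_zero_iff_dvd N q)]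
    exact ⟨j, by rw [hq, mul_comm]⟩

lemma inv_mark {N i : Int} {l : List Bool} (hN : 1 ≤ N) (hi : 1 ≤ i) (_hiN : i ≤ N)
    (hd : N % i = 0) (hInv : InvY N i l) :
    InvY N (i + 1) ((l.set i.toNat true).set (N / i).toNat true) := by
  obtain ⟨hlen, hget⟩ := hInv
  obtain ⟨ha1, haN, hinv, hdq⟩ := quot_facts hN hi hd
  refine ⟨by simp [hlen], ?_⟩
  intro j hjlen
  simp only [List.length_set] at hjlen
  have hjN : (j : Int) ≤ N := by omega
  rw [List.getElem_set, List.getElem_set]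
  by_cases hja : (N / i).toNat = j
  · have hje : (j : Int) = N / i := by omega
    simp only [hja]
    constructor
    · intro _
      exact ⟨by omega, by rw [hje]; exact hdq, by rw [hje, hinv]; right; omega⟩
    · intro _; rfl
  · by_cases hji : i.toNat = j
    · have hje : (j : Int) = i := by omega
      simp only [hja, hji]
      constructor
      · intro _
        exact ⟨by omega, by rw [hje]; exact hd, by omega⟩
      · intro _; rfl
    · simp only [if_neg hja, if_neg hji]
      rw [hget j (by omega)]
      unfold CondY
      constructor
      · rintro ⟨h1, h2, h3⟩; exact ⟨h1, h2, by omega⟩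
      · rintro ⟨h1, h2, h3⟩
        refine ⟨h1, h2, ?_⟩
        have hjne_i : (j : Int) ≠ i := by omega
        have hjne_a : (j : Int) ≠ N / i := by omega
        obtain ⟨_, _, hinvj, _⟩ := quot_facts hN h1 h2
        have hnja : N / (j : Int) ≠ i := by
          intro hc
          apply hjne_a
          rw [← hc, hinvj]
        omega

lemma inv_nodiv {N i : Int} {l : List Bool} (hN : 1 ≤ N) (_hi : 1 ≤ i)
    (hd : ¬ N % i = 0) (hInv : InvY N i l) : InvY N (i + 1) l := by
  obtain ⟨hlen, hget⟩ := hInv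
  refine ⟨hlen, ?_⟩
  intro j hjlen
  rw [hget j hjlen]
  unfold CondY
  constructor
  · rintro ⟨h1, h2, h3⟩; exact ⟨h1, h2, by omega⟩
  · rintro ⟨h1, h2, h3⟩
    refine ⟨h1, h2, ?_⟩
    have hji : (j : Int) ≠ i := by
      intro hc; apply hd; rw [← hc]; exact h2
    obtain ⟨_, _, _, hdq⟩ := quot_facts hN h1 h2
    have hnja : N / (j : Int) ≠ i := by
      intro hc; apply hd; rw [← hc]; exact hdq
    omega

lemma inv_skip {N i : Int} {l : List Bool} (hN : 1 ≤ N) (hi : 1 ≤ i) (_hiN : i ≤ N)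
    (hInv : InvY N i l) (hit : ∀ (h : i.toNat < l.length), l[i.toNat] = true) :
    InvY N (i + 1) l := by
  obtain ⟨hlen, hget⟩ := hInv
  have hitl : i.toNat < l.length := by omega
  have hC : CondY N i i.toNat := (hget i.toNat hitl).1 (hit hitl)
  obtain ⟨_, hdi, hcase⟩ := hC
  have hie : ((i.toNat : Nat) : Int) = i := by omega
  rw [hie] at hdi hcase
  have hqi : N / i < i := by omega
  refine ⟨hlen, ?_⟩
  intro j hjlen
  rw [hget j hjlen]
  unfold CondY
  constructor
  · rintro ⟨h1, h2, h3⟩; exact ⟨h1, h2, by omega⟩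
  · rintro ⟨h1, h2, h3⟩
    refine ⟨h1, h2, ?_⟩
    obtain ⟨_, _, hinvj, _⟩ := quot_facts hN h1 h2
    rcases h3 with h3 | h3
    · by_cases hji : (j : Int) = i
      · right; rw [hji]; exact hqi
      · left; omega
    · by_cases hc : N / (j : Int) = i
      · left
        have hje : (j : Int) = N / i := by rw [← hc, hinvj]
        omega
      · right; omega

-- A's exit: once every candidate 1..N has been processed, CondY collapses to divisibility.
lemma final_of_inv_ge {N i : Int} {l : List Bool} (hge : N + 1 ≤ i)
    (hInv : InvY N i l) : FinalY N l := by
  obtain ⟨hlen, hget⟩ := hInv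
  refine ⟨hlen, ?_⟩
  intro j hjlen
  rw [hget j hjlen]
  unfold CondY
  constructor
  · rintro ⟨h1, h2, _⟩; exact ⟨h1, h2⟩
  · rintro ⟨h1, h2⟩
    exact ⟨h1, h2, by left; omega⟩

-- B's exit: once i*i > N, every divisor pair {j, N/j} has a member below i.
lemma final_of_inv_sq {N i : Int} {l : List Bool} (hN : 1 ≤ N) (_hi : 1 ≤ i)
    (hgt : ¬ i * i ≤ N) (hInv : InvY N i l) : FinalY N l := by
  obtain ⟨hlen, hget⟩ := hInv
  refine ⟨hlen, ?_⟩
  intro j hjlen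
  rw [hget j hjlen]
  unfold CondY
  constructor
  · rintro ⟨h1, h2, _⟩; exact ⟨h1, h2⟩
  · rintro ⟨h1, h2⟩
    refine ⟨h1, h2, ?_⟩
    obtain ⟨hq1, _, _, _⟩ := quot_facts hN h1 h2
    obtain ⟨q, hq⟩ := (PySem.Int.emod_eq_zero_iff_dvd N (j : Int)).1 h2
    have hNj : N / (j : Int) = q := by
      rw [hq, Int.mul_ediv_cancel_left q (by omega)]
    by_cases hc1 : (j : Int) < i
    · left; exact hc1
    · right
      by_contra hc2
      simp only [not_lt] at hc1 hc2
      rw [hNj] at hc2 hq1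
      exact hgt (by nlinarith)

lemma stepA_inv {N i : Int} {l : List Bool} (hN : 1 ≤ N) (hi : 1 ≤ i) (hiN : i ≤ N)
    (hInv : InvY N i l) : InvY N (i + 1) (yaksuStepA N l i) := by
  unfold yaksuStepA
  by_cases hskip : (PySem.List.pyGet? l i).getD false = true
  · rw [if_pos hskip]
    refine inv_skip hN hi hiN hInv ?_
    intro h
    have hg := PySem.List.pyGet?_eq_some_getElem (xs := l) (i := i) (by omega) (by omega)
    rw [hg] at hskip
    simpa using hskip
  · rw [if_neg hskip]
    have hbi : (0:Int) < i := by omega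
    simp only []
    by_cases hb : PySem.Int.mod N i = 0
    · rw [if_pos hb]
      have hdvd : N % i = 0 := by rw [← PySem.Int.mod_eq_emod_of_pos hbi]; exact hb
      have h2 : (0:Int) ≤ N / i := by have := quot_facts hN hi hdvd; omega
      rw [PySem.Int.floordiv_eq_ediv_of_pos hbi,
        PySem.List.pySetD_of_nonneg l true (by omega : (0:Int) ≤ i),
        PySem.List.pySetD_of_nonneg (l.set i.toNat true) true h2]
      exact inv_mark hN hi hiN hdvd hInv
    · rw [if_neg hb]
      have hdvd : ¬ N % i = 0 := by rw [← PySem.Int.mod_eq_emod_of_pos hbi]; exact hb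
      exact inv_nodiv hN hi hdvd hInv

lemma loopA_final (N : Int) (hN : 1 ≤ N) :
    ∀ (fuel : Nat) (i : Int) (l : List Bool), (N + 1 - i).toNat ≤ fuel → 1 ≤ i → InvY N i l →
      FinalY N ((PySem.List.pyRange i (N + 1) 1).foldl (yaksuStepA N) l) := by
  intro fuel
  induction fuel with
  | zero =>
    intro i l hfuel hi hInv
    have hge : N + 1 ≤ i := by omega
    rw [show PySem.List.pyRange i (N + 1) 1 = [] by simp [PySem.List.pyRange, hge]]
    exact final_of_inv_ge hge hInv
  | succ fuel ih =>
    intro i l hfuel hi hInv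
    by_cases hlt : i < N + 1
    · rw [PySem.List.pyRange_one_cons hlt, List.foldl_cons]
      exact ih (i + 1) _ (by omega) (by omega) (stepA_inv hN hi (by omega) hInv)
    · have hge : N + 1 ≤ i := by omega
      rw [show PySem.List.pyRange i (N + 1) 1 = [] by simp [PySem.List.pyRange, hge]]
      exact final_of_inv_ge hge hInv

lemma loopB_final (N : Int) (hN : 1 ≤ N) :
    ∀ (fuel : Nat) (i : Int) (l : List Bool), (N + 1 - i).toNat ≤ fuel → 1 ≤ i → InvY N i l →
      FinalY N (yaksuLoopB N fuel i l) := by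
  intro fuel
  induction fuel with
  | zero =>
    intro i l hfuel hi hInv
    have hgt : ¬ i * i ≤ N := by
      intro hc
      have : i ≤ N := by nlinarith
      omega
    exact final_of_inv_sq hN hi hgt hInv
  | succ fuel ih =>
    intro i l hfuel hi hInv
    rw [yaksuLoopB]
    by_cases hle : i * i ≤ N
    · rw [if_pos hle]
      have hbi : (0:Int) < i := by omega
      have hiN : i ≤ N := by nlinarith
      apply ih (i + 1) _ (by omega) (by omega)
      by_cases hb : PySem.Int.mod N i = 0
      · rw [if_pos hb]
        have hdvd : N % i = 0 := by rw [← PySem.Int.mod_eq_emod_of_pos hbi]; exact hb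
        have h2 : (0:Int) ≤ N / i := by have := quot_facts hN hi hdvd; omega
        rw [PySem.Int.floordiv_eq_ediv_of_pos hbi,
          PySem.List.pySetD_of_nonneg l true (by omega : (0:Int) ≤ i),
          PySem.List.pySetD_of_nonneg (l.set i.toNat true) true h2]
        exact inv_mark hN hi hiN hdvd hInv
      · rw [if_neg hb]
        have hdvd : ¬ N % i = 0 := by rw [← PySem.Int.mod_eq_emod_of_pos hbi]; exact hb
        exact inv_nodiv hN hi hdvd hInv
    · rw [if_neg hle]
      exact final_of_inv_sq hN hi hle hInv

lemma inv_init (N : Int) (hN : 1 ≤ N) :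
    InvY N 1 (List.replicate (N + 1).toNat false) := by
  refine ⟨by simp, ?_⟩
  intro j hjlen
  simp only [List.getElem_replicate]
  constructor
  · intro h; simp at h
  · rintro ⟨h1, h2, h3⟩
    exfalso
    obtain ⟨hq1, _, _, _⟩ := quot_facts hN h1 h2
    omega

lemma final_eq {N : Int} {l1 l2 : List Bool} (h1 : FinalY N l1) (h2 : FinalY N l2) :
    l1 = l2 := by
  obtain ⟨hlen1, hget1⟩ := h1
  obtain ⟨hlen2, hget2⟩ := h2
  apply List.ext_getElem (by omega)
  intro j hj1 hj2
  have e1 := hget1 j hj1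
  have e2 := hget2 j hj2
  by_cases hP : (1 ≤ (j : Int) ∧ N % (j : Int) = 0)
  · rw [e1.2 hP, e2.2 hP]
  · cases hb1 : l1[j] <;> cases hb2 : l2[j] <;> first
      | rfl
      | (exfalso; first | exact hP (e1.1 hb1) | exact hP (e2.1 hb2))

-- ===== VERDICT (by name: the statement is the Claim_ definition above) =====
theorem yaksu_spec : Claim_equal_yaksu := by
  intro N _
  unfold Spec_yaksu yaksu yaksu_alt
  by_cases hN : 1 ≤ N
  · have hA := loopA_final N hN (N + 1).toNat 1 _ (by omega) le_rfl (inv_init N hN)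
    have hB := loopB_final N hN (N + 1).toNat 1 _ (by omega) le_rfl (inv_init N hN)
    rw [final_eq hA hB]
  · have h1 : PySem.List.pyRange 1 (N + 1) 1 = [] := by
      simp [PySem.List.pyRange]
      intros
      omega
    have h3 : ∀ (f : Nat) (l : List Bool), yaksuLoopB N f 1 l = l := by
      intro f l
      cases f with
      | zero => rfl
      | succ f => rw [yaksuLoopB, if_neg (by omega : ¬ (1:Int) * 1 ≤ N)]
    rw [h1]
    simp only [List.foldl_nil]
    rw [h3]
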